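-- pv_equiv track=rewrite | github.com/isismeira/prog | provas/questoes_baseadas_p2.py | remover_pontuacao
-- ===== SOURCE A (Python) =====
-- def remover_pontuacao(texto, simbolos):
--     novo_texto = ""
--     dentro_aspas = False
--
--     for letra in texto:
--         if letra == '"':
--             if dentro_aspas == False:
--                 novo_texto += letra
--                 dentro_aspas = True
--             elif dentro_aspas == True:
--                 novo_texto += letra
--                 dentro_aspas = False
--         elif letra in simbolos and dentro_aspas == False:
--             continue
--         else:
--             novo_texto += letra
--
--     return novo_texto
-- ===== SOURCE B (Python) =====
-- def remover_pontuacao(texto, simbolos):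
--     partes = texto.split('"')
--     resultado = []
--     for i, parte in enumerate(partes):
--         if i % 2 == 0:
--             parte = ''.join(c for c in parte if c not in simbolos)
--         resultado.append(parte)
--     return '"'.join(resultado)
-- ===== Notes on version B (the rewrite author's own statement) =====
-- stated objective: alternative
-- what changed: Replaced the per-character quote-state machine with split('"') into alternating outside/inside segments, filtering only even-index segments and rejoining with '"'.
import Mathlib
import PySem

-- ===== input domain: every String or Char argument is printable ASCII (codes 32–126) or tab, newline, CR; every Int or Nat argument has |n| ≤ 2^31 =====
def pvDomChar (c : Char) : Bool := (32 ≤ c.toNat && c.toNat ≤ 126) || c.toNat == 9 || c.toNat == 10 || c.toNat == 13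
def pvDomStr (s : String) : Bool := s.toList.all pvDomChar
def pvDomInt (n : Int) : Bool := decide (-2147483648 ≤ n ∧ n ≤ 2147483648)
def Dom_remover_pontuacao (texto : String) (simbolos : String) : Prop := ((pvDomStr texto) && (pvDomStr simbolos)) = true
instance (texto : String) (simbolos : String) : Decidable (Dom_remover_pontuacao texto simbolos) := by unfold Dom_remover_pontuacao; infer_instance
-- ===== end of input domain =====

-- B replaces A's per-character quote-state machine by split-on-'"' / filter even-index parts / rejoin (alternative decomposition, same cost).

-- ===== PORT A =====
-- A's for-loop over the characters with the accumulated string and the dentro_aspas flag as state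
def pvALoop (simbolos : List Char) : List Char → List Char → Bool → List Char × Bool
  | [], novo, dentro => (novo, dentro)
  | c :: rest, novo, dentro =>
    if c = '"' then
      if dentro = false then pvALoop simbolos rest (novo ++ [c]) true
      else pvALoop simbolos rest (novo ++ [c]) false
    else if simbolos.contains c && dentro == false then
      pvALoop simbolos rest novo dentro
    else
      pvALoop simbolos rest (novo ++ [c]) dentro

def remover_pontuacao (texto : String) (simbolos : String) : String :=
  String.mk (pvALoop simbolos.toList texto.toList [] false).1

-- ===== PORT B =====
-- ''.join(c for c in parte if c not in simbolos)
def pvBFilter (simbolos : List Char) (parte : List Char) : List Char :=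
  parte.filter (fun c => !(simbolos.contains c))

-- for i, parte in enumerate(partes): keep odd-index parts, filter even-index parts
def pvBLoop (simbolos : List Char) (i : Nat) : List (List Char) → List (List Char)
  | [] => []
  | p :: ps => (if i % 2 == 0 then pvBFilter simbolos p else p) :: pvBLoop simbolos (i + 1) ps

def remover_pontuacao_alt (texto : String) (simbolos : String) : String :=
  String.mk (['"'].intercalate (pvBLoop simbolos.toList 0 (texto.toList.splitOn '"')))

-- ===== PRECONDITION & SPEC =====
def Spec_remover_pontuacao (texto : String) (simbolos : String) (out : String) : Prop := out = remover_pontuacao_alt texto simbolos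
instance (texto : String) (simbolos : String) (out : String) : Decidable (Spec_remover_pontuacao texto simbolos out) := by unfold Spec_remover_pontuacao; infer_instance

-- ===== CLAIM (what is proved, stated in full; the proofs are below) =====
def Claim_equal_remover_pontuacao : Prop := ∀ (texto : String) (simbolos : String), Dom_remover_pontuacao texto simbolos → Spec_remover_pontuacao texto simbolos (remover_pontuacao texto simbolos)

-- ===== LEMMAS AND PROOFS =====

-- step equations for A's loop
theorem pvALoop_quote (S : List Char) (rest novo : List Char) (b : Bool) :
    pvALoop S ('"' :: rest) novo b = pvALoop S rest (novo ++ ['"']) (!b) := by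
  cases b <;> simp [pvALoop]

theorem pvALoop_other (S : List Char) (c : Char) (rest novo : List Char) (b : Bool) (hq : ¬c = '"') :
    pvALoop S (c :: rest) novo b =
      if c ∈ S ∧ b = false then pvALoop S rest novo b else pvALoop S rest (novo ++ [c]) b := by
  simp [pvALoop, hq]

-- A's loop only ever appends to novo
theorem pvALoop_acc (S : List Char) (cs : List Char) :
    ∀ (novo : List Char) (b : Bool), (pvALoop S cs novo b).1 = novo ++ (pvALoop S cs [] b).1 := by
  induction cs with
  | nil => intro novo b; simp [pvALoop]
  | cons c rest ih =>
    intro novo b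
    by_cases hq : c = '"'
    · subst hq
      rw [pvALoop_quote, pvALoop_quote, ih (novo ++ ['"']) (!b), ih ([] ++ ['"']) (!b)]
      simp
    · rw [pvALoop_other _ _ _ _ _ hq, pvALoop_other _ _ _ _ _ hq]
      by_cases hs : c ∈ S ∧ b = false
      · rw [if_pos hs, if_pos hs]; exact ih novo b
      · rw [if_neg hs, if_neg hs, ih (novo ++ [c]) b, ih ([] ++ [c]) b]
        simp

-- the result of A's loop, structurally
def pvARun (S : List Char) (b : Bool) : List Char → List Char
  | [] => []
  | c :: rest =>
    if c = '"' then c :: pvARun S (!b) rest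
    else if c ∈ S ∧ b = false then pvARun S b rest
    else c :: pvARun S b rest

theorem pvARun_cons (S : List Char) (b : Bool) (c : Char) (rest : List Char) :
    pvARun S b (c :: rest) =
      if c = '"' then c :: pvARun S (!b) rest
      else if c ∈ S ∧ b = false then pvARun S b rest
      else c :: pvARun S b rest := rfl

theorem pvALoop_eq_run (S : List Char) (cs : List Char) :
    ∀ b, (pvALoop S cs [] b).1 = pvARun S b cs := by
  induction cs with
  | nil => intro b; simp [pvALoop, pvARun]
  | cons c rest ih =>
    intro b
    by_cases hq : c = '"'
    · subst hq
      rw [pvALoop_quote, pvARun_cons, if_pos rfl, List.nil_append, pvALoop_acc, ih]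
      rfl
    · rw [pvALoop_other _ _ _ _ _ hq, pvARun_cons, if_neg hq]
      by_cases hs : c ∈ S ∧ b = false
      · rw [if_pos hs, if_pos hs]; exact ih b
      · rw [if_neg hs, if_neg hs, List.nil_append, pvALoop_acc, ih]
        rfl

-- B's loop only depends on the parity of the index
theorem pvBLoop_parity (S : List Char) (ps : List (List Char)) :
    ∀ i j, i % 2 = j % 2 → pvBLoop S i ps = pvBLoop S j ps := by
  induction ps with
  | nil => intro i j _; rfl
  | cons p ps ih =>
    intro i j h
    simp only [pvBLoop, h]
    rw [ih (i + 1) (j + 1) (by omega)]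

theorem pvBLoop_ne_nil (S : List Char) (i : Nat) (ps : List (List Char)) (h : ps ≠ []) :
    pvBLoop S i ps ≠ [] := by
  cases ps with
  | nil => exact absurd rfl h
  | cons p ps => simp [pvBLoop]

theorem intercalate_q_cons (q : Char) (x : List Char) (t : List (List Char)) :
    [q].intercalate (x :: t) = x ++ if t = [] then [] else q :: [q].intercalate t := by
  cases t with
  | nil => simp [List.intercalate]
  | cons y t => simp [List.intercalate, List.intersperse_cons₂]

theorem intercalate_q_cons_head (q c : Char) (x : List Char) (t : List (List Char)) :
    [q].intercalate ((c :: x) :: t) = c :: [q].intercalate (x :: t) := by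
  rw [intercalate_q_cons, intercalate_q_cons]
  simp

-- key lemma: A's state machine equals B's split/filter/join, with dentro_aspas ↔ index parity
theorem pvARun_eq_B (S : List Char) (cs : List Char) :
    ∀ b, pvARun S b cs = ['"'].intercalate (pvBLoop S (if b then 1 else 0) (cs.splitOn '"')) := by
  induction cs with
  | nil =>
    intro b
    cases b <;> simp [pvARun, pvBLoop, pvBFilter, List.splitOn_nil, List.intercalate]
  | cons c rest ih =>
    intro b
    show pvARun S b (c :: rest) =
      ['"'].intercalate (pvBLoop S (if b then 1 else 0) ((c :: rest).splitOnP (· == '"')))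
    rw [List.splitOnP_cons]
    by_cases hq : c = '"'
    · subst hq
      rw [if_pos (show (('"' : Char) == '"') = true from rfl)]
      have hne := List.splitOnP_ne_nil (· == '"') rest
      have hstep : ∀ i : Nat, pvBLoop S i ([] :: rest.splitOnP (· == '"')) =
          [] :: pvBLoop S (i + 1) (rest.splitOnP (· == '"')) := by
        intro i; by_cases hi : (i % 2 == 0) = true <;> simp [pvBLoop, pvBFilter, hi]
      rw [hstep, intercalate_q_cons, if_neg (pvBLoop_ne_nil S _ _ hne)]
      have hflip : pvBLoop S ((if b then 1 else 0) + 1) (rest.splitOnP (· == '"')) =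
          pvBLoop S (if !b then 1 else 0) (rest.splitOnP (· == '"')) := by
        cases b
        · rfl
        · exact pvBLoop_parity S _ 2 0 (by omega)
      rw [hflip, pvARun_cons, if_pos rfl, ih (!b)]
      rfl
    · rw [if_neg (show ¬((c == '"') = true) by simp [hq])]
      obtain ⟨h, t, hsplit⟩ := List.exists_cons_of_ne_nil (List.splitOnP_ne_nil (· == '"') rest)
      rw [hsplit, List.modifyHead_cons]
      have ihb := ih b
      rw [show rest.splitOn '"' = rest.splitOnP (· == '"') from rfl, hsplit] at ihb
      rw [pvARun_cons, if_neg hq]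
      cases b with
      | false =>
        rw [show (if (false : Bool) then 1 else 0) = 0 from rfl] at ihb ⊢
        rw [show pvBLoop S 0 ((c :: h) :: t) =
          pvBFilter S (c :: h) :: pvBLoop S 1 t from rfl]
        rw [show pvBLoop S 0 (h :: t) = pvBFilter S h :: pvBLoop S 1 t from rfl] at ihb
        by_cases hc : c ∈ S
        · rw [if_pos ⟨hc, rfl⟩, ihb,
            show pvBFilter S (c :: h) = pvBFilter S h by simp [pvBFilter, List.filter_cons, hc]]
        · rw [if_neg (show ¬(c ∈ S ∧ (false : Bool) = false) by simp [hc]), ihb,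
            show pvBFilter S (c :: h) = c :: pvBFilter S h by simp [pvBFilter, List.filter_cons, hc],
            intercalate_q_cons_head]
      | true =>
        rw [show (if (true : Bool) then 1 else 0) = 1 from rfl] at ihb ⊢
        rw [show pvBLoop S 1 ((c :: h) :: t) = (c :: h) :: pvBLoop S 2 t from rfl]
        rw [show pvBLoop S 1 (h :: t) = h :: pvBLoop S 2 t from rfl] at ihb
        rw [if_neg (show ¬(c ∈ S ∧ (true : Bool) = false) by simp), ihb, intercalate_q_cons_head]

-- ===== VERDICT (by name: the statement is the Claim_ definition above) =====
theorem remover_pontuacao_spec : Claim_equal_remover_pontuacao := by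
  intro texto simbolos _
  unfold Spec_remover_pontuacao remover_pontuacao remover_pontuacao_alt
  rw [pvALoop_eq_run, pvARun_eq_B]
  simp
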